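-- pv_equiv track=rewrite | github.com/Wulfic/Cicada3301 | tools/test_word_as_key.py | word_to_indices
-- ===== SOURCE A (Python) =====
-- LETTERS = ['F', 'U', 'TH', 'O', 'R', 'C', 'G', 'W', 'H', 'N',
--            'I', 'J', 'EO', 'P', 'X', 'S', 'T', 'B', 'E', 'M',
--            'L', 'NG', 'OE', 'D', 'A', 'AE', 'Y', 'IA', 'EA']
--
-- def word_to_indices(word):
--     """Convert a word to rune indices"""
--     result = []
--     i = 0
--     while i < len(word):
--         # Try 2-letter combinations first
--         if i + 1 < len(word):
--             two_char = word[i:i+2]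
--             if two_char in LETTERS:
--                 result.append(LETTERS.index(two_char))
--                 i += 2
--                 continue
--         # Single letter
--         one_char = word[i:i+1]
--         if one_char in LETTERS:
--             result.append(LETTERS.index(one_char))
--         i += 1
--     return result
-- ===== SOURCE B (Python) =====
-- import re
--
-- LETTERS = ['F', 'U', 'TH', 'O', 'R', 'C', 'G', 'W', 'H', 'N',
--            'I', 'J', 'EO', 'P', 'X', 'S', 'T', 'B', 'E', 'M',
--            'L', 'NG', 'OE', 'D', 'A', 'AE', 'Y', 'IA', 'EA']
--
-- _RUNE_IDX = {r: i for i, r in enumerate(LETTERS)}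
-- # Two-character runes first so the alternation prefers them at each position.
-- _RUNE_RE = re.compile('|'.join(sorted(LETTERS, key=len, reverse=True)))
--
-- def word_to_indices(word):
--     """Convert a word to rune indices"""
--     return [_RUNE_IDX[m.group()] for m in _RUNE_RE.finditer(word)]
-- ===== Notes on version B (the rewrite author's own statement) =====
-- stated objective: faster
-- what changed: Replaced the manual while-loop with its per-position `in LETTERS` scan and `.index` rescan by a precompiled regex alternation (two-character runes first) plus a precomputed rune->index dict; the regex engine performs the greedy left-to-right scan.
import Mathlib
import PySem

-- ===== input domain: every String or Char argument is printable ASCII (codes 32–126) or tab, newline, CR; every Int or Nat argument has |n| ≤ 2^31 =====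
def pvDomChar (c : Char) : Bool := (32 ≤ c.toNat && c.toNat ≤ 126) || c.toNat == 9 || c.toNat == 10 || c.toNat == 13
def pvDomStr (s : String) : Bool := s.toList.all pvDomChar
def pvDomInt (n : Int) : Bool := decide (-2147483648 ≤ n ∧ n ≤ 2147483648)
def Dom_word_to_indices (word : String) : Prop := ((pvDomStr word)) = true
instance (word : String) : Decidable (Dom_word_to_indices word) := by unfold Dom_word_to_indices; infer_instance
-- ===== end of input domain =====

-- B replaces A's hand-written while-loop (a membership scan plus an `.index` rescan of LETTERS
-- at every position) by a precompiled regex alternation over the rune literals (two-character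
-- runes first) together with a precomputed rune→index dict (objective: idiomatic).

-- ===== PORT A =====
-- Python strings are represented by their character lists (string equality = list equality).
def LETTERS : List (List Char) :=
  [['F'], ['U'], ['T','H'], ['O'], ['R'], ['C'], ['G'], ['W'], ['H'], ['N'],
   ['I'], ['J'], ['E','O'], ['P'], ['X'], ['S'], ['T'], ['B'], ['E'], ['M'],
   ['L'], ['N','G'], ['O','E'], ['D'], ['A'], ['A','E'], ['Y'], ['I','A'], ['E','A']]

-- A's while-loop, recursion on the index i (measure: length - i).
-- `.getD 0` is never reached: `LETTERS.index` is guarded by the membership test, as in A.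
def aLoop (cs : List Char) (i : Nat) : List Int :=
  if _h : i < cs.length then
    if i + 1 < cs.length then
      let two := PySem.List.slice cs (some (i : Int)) (some ((i : Int) + 2))
      if two ∈ LETTERS then
        (((PySem.List.index? LETTERS two).getD 0 : Nat) : Int) :: aLoop cs (i + 2)
      else
        let one := PySem.List.slice cs (some (i : Int)) (some ((i : Int) + 1))
        if one ∈ LETTERS then
          (((PySem.List.index? LETTERS one).getD 0 : Nat) : Int) :: aLoop cs (i + 1)
        else aLoop cs (i + 1)
    else
      let one := PySem.List.slice cs (some (i : Int)) (some ((i : Int) + 1))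
      if one ∈ LETTERS then
        (((PySem.List.index? LETTERS one).getD 0 : Nat) : Int) :: aLoop cs (i + 1)
      else aLoop cs (i + 1)
  else []
termination_by cs.length - i
decreasing_by all_goals omega

def word_to_indices (word : String) : List Int := aLoop word.toList 0

-- ===== PORT B =====
-- the alternation 'TH|EO|NG|OE|AE|IA|EA|F|U|O|R|C|G|W|H|N|I|J|P|X|S|T|B|E|M|L|D|A|Y'
def ALTS : List (List Char) :=
  [['T','H'], ['E','O'], ['N','G'], ['O','E'], ['A','E'], ['I','A'], ['E','A'],
   ['F'], ['U'], ['O'], ['R'], ['C'], ['G'], ['W'], ['H'], ['N'], ['I'], ['J'],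
   ['P'], ['X'], ['S'], ['T'], ['B'], ['E'], ['M'], ['L'], ['D'], ['A'], ['Y']]

-- _RUNE_IDX = {r: i for i, r in enumerate(LETTERS)}
def RUNE_IDX : PySem.Dict (List Char) Int :=
  (PySem.List.enumerate LETTERS 0).foldl (fun d p => d.insert p.2 p.1) PySem.Dict.empty

-- re.finditer over an alternation of plain literals: at each position the engine tries the
-- alternatives in pattern order, the first one that is a prefix of the remaining text matches
-- and the scan resumes right after it; otherwise the scan advances one character.  This is
-- exactly the regex semantics for this pattern (no backtracking interaction: literals only).
def bScan : List Char → List Int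
  | [] => []
  | c :: rest =>
    match ALTS.find? (fun a => a.isPrefixOf (c :: rest)) with
    | some a => RUNE_IDX.getD a 0 :: bScan (List.drop (a.length - 1) rest)
    | none => bScan rest
termination_by cs => cs.length
decreasing_by all_goals simp only [List.length_drop, List.length_cons]; omega

def word_to_indices_alt (word : String) : List Int := bScan word.toList

-- ===== PRECONDITION & SPEC =====
def Spec_word_to_indices (word : String) (out : List Int) : Prop := out = word_to_indices_alt word
instance (word : String) (out : List Int) : Decidable (Spec_word_to_indices word out) := by unfold Spec_word_to_indices; infer_instance

-- ===== CLAIM (what is proved, stated in full; the proofs are below) =====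
def Claim_equal_word_to_indices : Prop := ∀ (word : String), Dom_word_to_indices word → Spec_word_to_indices word (word_to_indices word)

-- ===== LEMMAS AND PROOFS =====

-- the two-character and the single-character alternatives of the pattern, in order
def TWOS : List (List Char) :=
  [['T','H'], ['E','O'], ['N','G'], ['O','E'], ['A','E'], ['I','A'], ['E','A']]
def ONES : List (List Char) :=
  [['F'], ['U'], ['O'], ['R'], ['C'], ['G'], ['W'], ['H'], ['N'], ['I'], ['J'],
   ['P'], ['X'], ['S'], ['T'], ['B'], ['E'], ['M'], ['L'], ['D'], ['A'], ['Y']]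

lemma ALTS_eq : ALTS = TWOS ++ ONES := rfl

lemma mem_two_letters (c d : Char) : [c, d] ∈ LETTERS ↔ [c, d] ∈ TWOS := by
  simp [LETTERS, TWOS]

lemma mem_one_letters (c : Char) : [c] ∈ LETTERS ↔ [c] ∈ ONES := by
  simp [LETTERS, ONES]

lemma find_twos_mem (c d : Char) (rest : List Char) (h : [c, d] ∈ TWOS) :
    TWOS.find? (fun a => a.isPrefixOf (c :: d :: rest)) = some [c, d] := by
  simp only [TWOS, List.mem_cons, List.not_mem_nil, or_false, List.cons.injEq, and_true] at h
  rcases h with ⟨rfl,rfl⟩|⟨rfl,rfl⟩|⟨rfl,rfl⟩|⟨rfl,rfl⟩|⟨rfl,rfl⟩|⟨rfl,rfl⟩|⟨rfl,rfl⟩ <;>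
    simp [TWOS, List.find?, List.isPrefixOf]

lemma find_twos_not_mem (c d : Char) (rest : List Char) (h : [c, d] ∉ TWOS) :
    TWOS.find? (fun a => a.isPrefixOf (c :: d :: rest)) = none := by
  simp only [TWOS, List.mem_cons, List.not_mem_nil, or_false, List.cons.injEq, and_true,
    not_or] at h
  simp only [TWOS, List.find?, List.isPrefixOf]
  repeat' split
  all_goals simp_all [@eq_comm Char]

lemma find_twos_single (c : Char) :
    TWOS.find? (fun a => a.isPrefixOf [c]) = none := by
  simp [TWOS, List.find?, List.isPrefixOf]

lemma find_ones (c : Char) (rest : List Char) :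
    ONES.find? (fun a => a.isPrefixOf (c :: rest)) =
      if [c] ∈ ONES then some [c] else none := by
  by_cases h : [c] ∈ ONES
  · rw [if_pos h]
    simp only [ONES, List.mem_cons, List.not_mem_nil, or_false, List.cons.injEq,
      and_true] at h
    rcases h with rfl|rfl|rfl|rfl|rfl|rfl|rfl|rfl|rfl|rfl|rfl|rfl|rfl|rfl|rfl|rfl|rfl|rfl|rfl|rfl|rfl|rfl <;>
      simp [ONES, List.find?, List.isPrefixOf]
  · rw [if_neg h]
    simp only [ONES, List.mem_cons, List.not_mem_nil, or_false, List.cons.injEq, and_true,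
      not_or] at h
    simp only [ONES, List.find?, List.isPrefixOf]
    repeat' split
    all_goals simp_all [@eq_comm Char]

lemma idx_two (c d : Char) (h : [c, d] ∈ TWOS) :
    (((PySem.List.index? LETTERS [c, d]).getD 0 : Nat) : Int) = RUNE_IDX.getD [c, d] 0 := by
  simp only [TWOS, List.mem_cons, List.not_mem_nil, or_false, List.cons.injEq, and_true] at h
  rcases h with ⟨rfl,rfl⟩|⟨rfl,rfl⟩|⟨rfl,rfl⟩|⟨rfl,rfl⟩|⟨rfl,rfl⟩|⟨rfl,rfl⟩|⟨rfl,rfl⟩ <;> decide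

lemma idx_one (c : Char) (h : [c] ∈ ONES) :
    (((PySem.List.index? LETTERS [c]).getD 0 : Nat) : Int) = RUNE_IDX.getD [c] 0 := by
  simp only [ONES, List.mem_cons, List.not_mem_nil, or_false, List.cons.injEq, and_true] at h
  rcases h with rfl|rfl|rfl|rfl|rfl|rfl|rfl|rfl|rfl|rfl|rfl|rfl|rfl|rfl|rfl|rfl|rfl|rfl|rfl|rfl|rfl|rfl <;>
    decide

lemma slice_two (cs : List Char) (i : Nat) :
    PySem.List.slice cs (some (i : Int)) (some ((i : Int) + 2)) = (cs.drop i).take 2 := by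
  have h2 : ((i : Int) + 2) = ((i + 2 : Nat) : Int) := by push_cast; ring
  rw [h2, PySem.List.slice_natCast]
  congr 1
  omega

lemma slice_one (cs : List Char) (i : Nat) :
    PySem.List.slice cs (some (i : Int)) (some ((i : Int) + 1)) = (cs.drop i).take 1 := by
  have h1 : ((i : Int) + 1) = ((i + 1 : Nat) : Int) := by push_cast; ring
  rw [h1, PySem.List.slice_natCast]
  congr 1
  omega

lemma main_lemma : ∀ n cs i, cs.length - i ≤ n → aLoop cs i = bScan (cs.drop i) := by
  intro n
  induction n with
  | zero =>
    intro cs i h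
    have hlen : ¬ i < cs.length := by omega
    rw [aLoop, dif_neg hlen, List.drop_eq_nil_of_le (by omega), bScan]
  | succ n ih =>
    intro cs i h
    by_cases hlen : i < cs.length
    · have hdrop : cs.drop i = cs[i] :: cs.drop (i + 1) := List.drop_eq_getElem_cons hlen
      by_cases h2 : i + 1 < cs.length
      · have hdrop2 : cs.drop (i + 1) = cs[i+1] :: cs.drop (i + 2) :=
          List.drop_eq_getElem_cons h2
        set c := cs[i] with hc
        set d := cs[i+1] with hd
        have htake2 : (cs.drop i).take 2 = [c, d] := by rw [hdrop, hdrop2]; rfl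
        have htake1 : (cs.drop i).take 1 = [c] := by rw [hdrop]; rfl
        rw [aLoop, dif_pos hlen, if_pos h2, slice_two, slice_one, htake2, htake1]
        by_cases hm : [c, d] ∈ LETTERS
        · rw [if_pos hm]
          have hmt : [c, d] ∈ TWOS := (mem_two_letters c d).mp hm
          rw [hdrop, hdrop2, bScan, ALTS_eq, List.find?_append, find_twos_mem c d _ hmt]
          simp only [Option.some_or, List.length_cons, List.length_nil]
          rw [idx_two c d hmt]
          have := ih cs (i + 2) (by omega)
          simp only [Nat.add_sub_cancel, List.drop_succ_cons, List.drop_drop] at *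
          rw [this]
        · rw [if_neg hm]
          have hmt : [c, d] ∉ TWOS := fun hx => hm ((mem_two_letters c d).mpr hx)
          have hfind : ALTS.find? (fun a => a.isPrefixOf (c :: d :: cs.drop (i + 2))) =
              if [c] ∈ ONES then some [c] else none := by
            rw [ALTS_eq, List.find?_append, find_twos_not_mem c d _ hmt]
            simp [find_ones c (d :: cs.drop (i + 2))]
          by_cases hm1 : [c] ∈ LETTERS
          · have hmo : [c] ∈ ONES := (mem_one_letters c).mp hm1
            rw [if_pos hm1, hdrop, hdrop2, bScan, hfind, if_pos hmo]
            rw [idx_one c hmo]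
            have := ih cs (i + 1) (by omega)
            rw [hdrop2] at this
            simp only [List.length_cons, List.length_nil, Nat.sub_self, List.drop_zero]
            rw [this]
          · have hmo : [c] ∉ ONES := fun hx => hm1 ((mem_one_letters c).mpr hx)
            rw [if_neg hm1, hdrop, hdrop2, bScan, hfind, if_neg hmo]
            have := ih cs (i + 1) (by omega)
            rw [hdrop2] at this
            rw [this]
      · -- last character: drop i = [c]
        have hone : cs.drop i = [cs[i]] := by
          rw [hdrop, List.drop_eq_nil_of_le (by omega)]
        set c := cs[i] with hc
        have htake1 : (cs.drop i).take 1 = [c] := by rw [hone]; rfl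
        rw [aLoop, dif_pos hlen, if_neg h2, slice_one, htake1]
        have hfind : ALTS.find? (fun a => a.isPrefixOf [c]) =
            if [c] ∈ ONES then some [c] else none := by
          rw [ALTS_eq, List.find?_append, find_twos_single c]
          simp [find_ones c []]
        have htail : cs.drop (i + 1) = [] := List.drop_eq_nil_of_le (by omega)
        by_cases hm1 : [c] ∈ LETTERS
        · have hmo : [c] ∈ ONES := (mem_one_letters c).mp hm1
          rw [if_pos hm1, hone, bScan, hfind, if_pos hmo, idx_one c hmo]
          have := ih cs (i + 1) (by omega)
          rw [htail] at this
          simp only [List.length_cons, List.length_nil, Nat.sub_self, List.drop_nil]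
          rw [this, bScan]
        · have hmo : [c] ∉ ONES := fun hx => hm1 ((mem_one_letters c).mpr hx)
          rw [if_neg hm1, hone, bScan, hfind, if_neg hmo]
          have := ih cs (i + 1) (by omega)
          rw [htail] at this
          rw [this, bScan]
    · rw [aLoop, dif_neg hlen, List.drop_eq_nil_of_le (by omega), bScan]

-- ===== VERDICT (by name: the statement is the Claim_ definition above) =====
theorem word_to_indices_spec : Claim_equal_word_to_indices := by
  intro word _
  unfold Spec_word_to_indices word_to_indices word_to_indices_alt
  simpa using main_lemma word.toList.length word.toList 0 (by omega)
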